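-- pv_equiv track=rewrite | github.com/SHolic/Snorkel-Labeling | xner/models/__init__.py | _merge_label_sentence_bmeso
-- ===== SOURCE A (Python) =====
-- def _merge_label_sentence_bmeso(sentence, label):
--     length = len(label)
--     ret_sentence, ret_label = [], []
--     curr_index = 0
--
--     while curr_index < length:
--         curr_label = label[curr_index].split("-")[-1]
--         curr_state = label[curr_index].split("-")[0]
--         if curr_state == "S":
--             ret_sentence.append(sentence[curr_index])
--             ret_label.append(curr_label)
--             curr_index += 1
--             continue
--
--         if curr_label == "O":
--             curr_merge_label = curr_label
--             curr_merge_sentence = ""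
--             while curr_label == "O":
--                 curr_merge_sentence += sentence[curr_index]
--                 curr_index += 1
--                 if curr_index >= length:
--                     break
--                 curr_label = label[curr_index].split("-")[-1]
--             ret_sentence.append(curr_merge_sentence)
--             ret_label.append(curr_merge_label)
--             continue
--
--         curr_merge_label = curr_label
--         curr_merge_sentence = ""
--         while curr_merge_label == curr_label:
--             curr_state = label[curr_index].split("-")[0]
--             curr_merge_sentence += sentence[curr_index]
--             if curr_state == "E":
--                 ret_sentence.append(curr_merge_sentence)
--                 ret_label.append(curr_merge_label)
--                 curr_merge_sentence = ""
--             curr_index += 1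
--             if curr_index >= length:
--                 break
--             curr_label = label[curr_index].split("-")[-1]
--         if curr_merge_sentence != "":
--             ret_sentence.append(curr_merge_sentence)
--             ret_label.append(curr_merge_label)
--
--     return ret_sentence, ret_label
-- ===== SOURCE B (Python) =====
-- def _merge_label_sentence_bmeso(sentence, label):
--     # Single flat pass carrying a pending buffer and its label across iterations.
--     # Side effects: none. Return value only (same as A where A returns).
--     ret_sentence, ret_label = [], []
--     buf = ""
--     buf_label = None  # None = no pending run; otherwise the suffix of the current run
--     for tok, lab in zip(sentence, label):
--         parts = lab.split("-")
--         st, sfx = parts[0], parts[-1]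
--         if buf_label is not None:
--             if sfx == buf_label:
--                 # run continues (suffix-only check, state ignored)
--                 buf += tok
--                 if buf_label != "O" and st == "E":
--                     ret_sentence.append(buf)
--                     ret_label.append(buf_label)
--                     buf = ""
--                 continue
--             # run ends here: flush pending ('O' runs always, entity runs if non-empty)
--             if buf_label == "O" or buf != "":
--                 ret_sentence.append(buf)
--                 ret_label.append(buf_label)
--             buf, buf_label = "", None
--         # fresh token
--         if st == "S":
--             ret_sentence.append(tok)
--             ret_label.append(sfx)
--         elif sfx != "O" and st == "E":
--             ret_sentence.append(tok)
--             ret_label.append(sfx)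
--             buf_label = sfx
--         else:
--             buf = tok
--             buf_label = sfx
--     if buf_label is not None and (buf_label == "O" or buf != ""):
--         ret_sentence.append(buf)
--         ret_label.append(buf_label)
--     return ret_sentence, ret_label
-- ===== Notes on version B (the rewrite author's own statement) =====
-- stated objective: simpler
-- what changed: A's outer while-loop with two nested run-consuming inner while-loops is replaced by a single flat pass over zip(sentence, label) that carries a pending buffer and its label across iterations, splitting each tag once instead of A's repeated per-index splits.
import Mathlib
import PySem

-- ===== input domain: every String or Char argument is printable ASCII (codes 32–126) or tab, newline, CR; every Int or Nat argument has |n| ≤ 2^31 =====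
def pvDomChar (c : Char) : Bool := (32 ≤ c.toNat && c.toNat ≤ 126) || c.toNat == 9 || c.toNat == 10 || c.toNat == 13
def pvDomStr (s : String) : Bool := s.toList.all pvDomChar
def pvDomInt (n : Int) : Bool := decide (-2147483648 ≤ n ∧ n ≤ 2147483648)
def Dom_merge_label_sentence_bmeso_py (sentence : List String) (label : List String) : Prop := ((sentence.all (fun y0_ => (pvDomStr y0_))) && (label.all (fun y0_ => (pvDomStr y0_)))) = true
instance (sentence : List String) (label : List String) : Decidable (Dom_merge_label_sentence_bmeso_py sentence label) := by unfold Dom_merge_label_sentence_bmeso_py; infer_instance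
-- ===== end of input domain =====

-- B replaces A's nested run-consuming while-loops by one flat pass over the
-- zipped (token, tag) pairs carrying a pending buffer and its label (objective: simpler).

-- shared helpers: Python's label.split("-")[0] and label.split("-")[-1]
def pvSplit (labl : String) : List String := (PySem.Str.split? labl "-").getD []
def pvSt (labl : String) : String := (pvSplit labl).headD ""
def pvSfx (labl : String) : String := (pvSplit labl).getLastD ""

-- ===== PORT A =====
-- A's while-loops are ported as recursions on an explicit fuel counter (a pure
-- totality guard: every call below supplies fuel ≥ the number of remaining indices,
-- so the guard never fires on the computation's path).

-- inner while of the "O" branch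
def aOLoop (sent lab : List String) : Nat → Nat → String → String × Nat
  | 0, i, acc => (acc, i)
  | fuel + 1, i, acc =>
    if h : i < lab.length then
      if pvSfx lab[i] == "O" then aOLoop sent lab fuel (i + 1) (acc ++ sent.getD i "")
      else (acc, i)
    else (acc, i)

-- inner while of the entity branch
def aEntLoop (sent lab : List String) (L : String) :
    Nat → Nat → String → List String → List String → List String × List String × String × Nat
  | 0, i, acc, rS, rL => (rS, rL, acc, i)
  | fuel + 1, i, acc, rS, rL =>
    if h : i < lab.length then
      if pvSfx lab[i] == L then
        let acc2 := acc ++ sent.getD i ""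
        if pvSt lab[i] == "E" then aEntLoop sent lab L fuel (i + 1) "" (rS ++ [acc2]) (rL ++ [L])
        else aEntLoop sent lab L fuel (i + 1) acc2 rS rL
      else (rS, rL, acc, i)
    else (rS, rL, acc, i)

-- outer while of A
def aMain (sent lab : List String) : Nat → Nat → List String → List String → List String × List String
  | 0, _, rS, rL => (rS, rL)
  | fuel + 1, i, rS, rL =>
    if h : i < lab.length then
      let L := pvSfx lab[i]
      if pvSt lab[i] == "S" then
        aMain sent lab fuel (i + 1) (rS ++ [sent.getD i ""]) (rL ++ [L])
      else if L == "O" then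
        let r := aOLoop sent lab lab.length i ""
        aMain sent lab fuel r.2 (rS ++ [r.1]) (rL ++ ["O"])
      else
        let r := aEntLoop sent lab L lab.length i "" rS rL
        if r.2.2.1 != "" then aMain sent lab fuel r.2.2.2 (r.1 ++ [r.2.2.1]) (r.2.1 ++ [L])
        else aMain sent lab fuel r.2.2.2 r.1 r.2.1
    else (rS, rL)

def merge_label_sentence_bmeso_py (sentence : List String) (label : List String) :
    List String × List String :=
  aMain sentence label label.length 0 [] []

-- ===== PORT B =====
-- one flat pass over zip(sentence, label) carrying (buf, bufLab)
def bLoop (ps : List (String × String)) (rS rL : List String) (buf : String)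
    (bufLab : Option String) : List String × List String :=
  match ps with
  | [] =>
    match bufLab with
    | none => (rS, rL)
    | some bl => if bl == "O" || buf != "" then (rS ++ [buf], rL ++ [bl]) else (rS, rL)
  | (tok, labl) :: rest =>
    let st := pvSt labl
    let sfx := pvSfx labl
    match bufLab with
    | some bl =>
      if sfx == bl then
        let buf2 := buf ++ tok
        if bl != "O" && st == "E" then bLoop rest (rS ++ [buf2]) (rL ++ [bl]) "" (some bl)
        else bLoop rest rS rL buf2 (some bl)
      else
        -- run ends: flush pending, then treat the token fresh (same code as the none branch)
        let p := if bl == "O" || buf != "" then (rS ++ [buf], rL ++ [bl]) else (rS, rL)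
        if st == "S" then bLoop rest (p.1 ++ [tok]) (p.2 ++ [sfx]) "" none
        else if sfx != "O" && st == "E" then bLoop rest (p.1 ++ [tok]) (p.2 ++ [sfx]) "" (some sfx)
        else bLoop rest p.1 p.2 tok (some sfx)
    | none =>
      if st == "S" then bLoop rest (rS ++ [tok]) (rL ++ [sfx]) "" none
      else if sfx != "O" && st == "E" then bLoop rest (rS ++ [tok]) (rL ++ [sfx]) "" (some sfx)
      else bLoop rest rS rL tok (some sfx)

def merge_label_sentence_bmeso_py_alt (sentence : List String) (label : List String) :
    List String × List String :=
  bLoop (sentence.zip label) [] [] "" none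

-- ===== PRECONDITION & SPEC =====
-- A indexes sentence at every position of label, so it raises IndexError iff
-- len(sentence) < len(label); Pre_ excludes exactly those inputs.
def Pre_merge_label_sentence_bmeso_py (sentence : List String) (label : List String) : Prop :=
  label.length ≤ sentence.length
instance (sentence : List String) (label : List String) :
    Decidable (Pre_merge_label_sentence_bmeso_py sentence label) := by
  unfold Pre_merge_label_sentence_bmeso_py; infer_instance

def pvWitness_merge_label_sentence_bmeso_py : List String × List String :=
  (["New", "York", "is", "big"], ["B-LOC", "E-LOC", "O", "O"])

def Spec_merge_label_sentence_bmeso_py (sentence : List String) (label : List String)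
    (out : List String × List String) : Prop :=
  out = merge_label_sentence_bmeso_py_alt sentence label
instance (sentence : List String) (label : List String) (out : List String × List String) :
    Decidable (Spec_merge_label_sentence_bmeso_py sentence label out) := by
  unfold Spec_merge_label_sentence_bmeso_py; infer_instance

-- ===== CLAIM (what is proved, stated in full; the proofs are below) =====
def Claim_equal_merge_label_sentence_bmeso_py : Prop :=
  ∀ (sentence : List String) (label : List String),
    Dom_merge_label_sentence_bmeso_py sentence label →
    Pre_merge_label_sentence_bmeso_py sentence label →
    Spec_merge_label_sentence_bmeso_py sentence label
      (merge_label_sentence_bmeso_py sentence label)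

-- ===== LEMMAS AND PROOFS =====

theorem zip_drop_cons (sent lab : List String) (i : Nat)
    (hpre : lab.length ≤ sent.length) (h : i < lab.length) :
    (sent.zip lab).drop i =
      (sent.getD i "", lab[i]) :: (sent.zip lab).drop (i + 1) := by
  have hz : i < (sent.zip lab).length := by simp [List.length_zip]; omega
  rw [List.drop_eq_getElem_cons hz]
  congr 1
  have hs : i < sent.length := by omega
  simp [List.getElem_zip, List.getElem?_eq_getElem hs]

theorem zip_drop_nil (sent lab : List String) (i : Nat) (h : lab.length ≤ i) :
    (sent.zip lab).drop i = [] := by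
  apply List.drop_eq_nil_of_le
  simp [List.length_zip]; omega

theorem aOLoop_ge (sent lab : List String) (fuel : Nat) : ∀ (i : Nat) (acc : String),
    i ≤ (aOLoop sent lab fuel i acc).2 := by
  induction fuel with
  | zero => intro i acc; simp [aOLoop]
  | succ fuel ih =>
    intro i acc
    rw [aOLoop]
    split
    · split
      · exact Nat.le_trans (Nat.le_succ i) (ih (i + 1) _)
      · simp
    · simp

theorem aOLoop_gt (sent lab : List String) (fuel i : Nat) (acc : String)
    (hf : 0 < fuel) (h : i < lab.length) (hs : (pvSfx lab[i] == "O") = true) :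
    i < (aOLoop sent lab fuel i acc).2 := by
  obtain ⟨fuel', rfl⟩ := Nat.exists_eq_succ_of_ne_zero (Nat.pos_iff_ne_zero.mp hf)
  rw [aOLoop]
  simp only [dif_pos h, if_pos hs]
  exact Nat.lt_of_lt_of_le (Nat.lt_succ_self i) (aOLoop_ge sent lab fuel' (i + 1) _)

theorem aEntLoop_ge (sent lab : List String) (L : String) (fuel : Nat) :
    ∀ (i : Nat) (acc : String) (rS rL : List String),
    i ≤ (aEntLoop sent lab L fuel i acc rS rL).2.2.2 := by
  induction fuel with
  | zero => intro i acc rS rL; simp [aEntLoop]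
  | succ fuel ih =>
    intro i acc rS rL
    rw [aEntLoop]
    split
    · split
      · split
        · exact Nat.le_trans (Nat.le_succ i) (ih (i + 1) _ _ _)
        · exact Nat.le_trans (Nat.le_succ i) (ih (i + 1) _ _ _)
      · simp
    · simp

theorem aEntLoop_gt (sent lab : List String) (L : String) (fuel i : Nat) (acc : String)
    (rS rL : List String) (hf : 0 < fuel) (h : i < lab.length)
    (hs : (pvSfx lab[i] == L) = true) :
    i < (aEntLoop sent lab L fuel i acc rS rL).2.2.2 := by
  obtain ⟨fuel', rfl⟩ := Nat.exists_eq_succ_of_ne_zero (Nat.pos_iff_ne_zero.mp hf)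
  rw [aEntLoop]
  simp only [dif_pos h, if_pos hs]
  split
  · exact Nat.lt_of_lt_of_le (Nat.lt_succ_self i) (aEntLoop_ge sent lab L fuel' (i + 1) _ _ _)
  · exact Nat.lt_of_lt_of_le (Nat.lt_succ_self i) (aEntLoop_ge sent lab L fuel' (i + 1) _ _ _)

theorem oLemma (sent lab : List String) (hpre : lab.length ≤ sent.length) (fuel : Nat) :
    ∀ (i : Nat) (acc : String) (rS rL : List String), lab.length - i ≤ fuel →
    bLoop ((sent.zip lab).drop i) rS rL acc (some "O") =
      bLoop ((sent.zip lab).drop (aOLoop sent lab fuel i acc).2)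
        (rS ++ [(aOLoop sent lab fuel i acc).1]) (rL ++ ["O"]) "" none := by
  induction fuel with
  | zero =>
    intro i acc rS rL hf
    simp only [aOLoop]
    rw [zip_drop_nil sent lab i (by omega)]
    simp [bLoop]
  | succ fuel ih =>
    intro i acc rS rL hf
    by_cases h : i < lab.length
    · by_cases hs : (pvSfx lab[i] == "O") = true
      · rw [show aOLoop sent lab (fuel + 1) i acc
              = aOLoop sent lab fuel (i + 1) (acc ++ sent.getD i "") from by
            rw [aOLoop]; simp [h, hs]]
        rw [zip_drop_cons sent lab i hpre h, ← ih (i + 1) _ rS rL (by omega)]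
        simp [bLoop, hs]
      · rw [show aOLoop sent lab (fuel + 1) i acc = (acc, i) from by
            rw [aOLoop]; simp only [dif_pos h]; rw [if_neg hs]]
        rw [zip_drop_cons sent lab i hpre h]
        simp [bLoop, hs]
    · rw [show aOLoop sent lab (fuel + 1) i acc = (acc, i) from by rw [aOLoop]; simp [h]]
      rw [zip_drop_nil sent lab i (by omega)]
      simp [bLoop]

theorem entLemma (sent lab : List String) (hpre : lab.length ≤ sent.length)
    (L : String) (hL : (L == "O") = false) (fuel : Nat) :
    ∀ (i : Nat) (acc : String) (rS rL : List String), lab.length - i ≤ fuel →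
    bLoop ((sent.zip lab).drop i) rS rL acc (some L) =
      bLoop ((sent.zip lab).drop (aEntLoop sent lab L fuel i acc rS rL).2.2.2)
        (if ((aEntLoop sent lab L fuel i acc rS rL).2.2.1 != "") = true then
          (aEntLoop sent lab L fuel i acc rS rL).1 ++
            [(aEntLoop sent lab L fuel i acc rS rL).2.2.1]
         else (aEntLoop sent lab L fuel i acc rS rL).1)
        (if ((aEntLoop sent lab L fuel i acc rS rL).2.2.1 != "") = true then
          (aEntLoop sent lab L fuel i acc rS rL).2.1 ++ [L]
         else (aEntLoop sent lab L fuel i acc rS rL).2.1)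
        "" none := by
  induction fuel with
  | zero =>
    intro i acc rS rL hf
    simp only [aEntLoop]
    rw [zip_drop_nil sent lab i (by omega)]
    by_cases hacc : acc = "" <;> simp [bLoop, hL, hacc]
  | succ fuel ih =>
    intro i acc rS rL hf
    by_cases h : i < lab.length
    · by_cases hs : (pvSfx lab[i] == L) = true
      · by_cases he : (pvSt lab[i] == "E") = true
        · rw [show aEntLoop sent lab L (fuel + 1) i acc rS rL
                = aEntLoop sent lab L fuel (i + 1) "" (rS ++ [acc ++ sent.getD i ""])
                    (rL ++ [L]) from by rw [aEntLoop]; simp [h, hs, he]]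
          rw [zip_drop_cons sent lab i hpre h]
          have hstep : bLoop ((sent.getD i "", lab[i]) :: List.drop (i + 1) (sent.zip lab))
              rS rL acc (some L) = bLoop (List.drop (i + 1) (sent.zip lab))
              (rS ++ [acc ++ sent.getD i ""]) (rL ++ [L]) "" (some L) := by
            simp [bLoop, hs, he, bne, hL]
          rw [hstep]
          exact ih (i + 1) "" _ _ (by omega)
        · rw [show aEntLoop sent lab L (fuel + 1) i acc rS rL
                = aEntLoop sent lab L fuel (i + 1) (acc ++ sent.getD i "") rS rL from by
              rw [aEntLoop]; simp [h, hs, he]]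
          rw [zip_drop_cons sent lab i hpre h]
          have hstep : bLoop ((sent.getD i "", lab[i]) :: List.drop (i + 1) (sent.zip lab))
              rS rL acc (some L) = bLoop (List.drop (i + 1) (sent.zip lab)) rS rL
              (acc ++ sent.getD i "") (some L) := by
            simp [bLoop, hs, he, bne, hL]
          rw [hstep]
          exact ih (i + 1) _ _ _ (by omega)
      · rw [show aEntLoop sent lab L (fuel + 1) i acc rS rL = (rS, rL, acc, i) from by
            rw [aEntLoop]; simp only [dif_pos h]; rw [if_neg hs]]
        rw [zip_drop_cons sent lab i hpre h]
        by_cases hacc : acc = "" <;> simp [bLoop, hs, hL, hacc]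
    · rw [show aEntLoop sent lab L (fuel + 1) i acc rS rL = (rS, rL, acc, i) from by
          rw [aEntLoop]; simp [h]]
      rw [zip_drop_nil sent lab i (by omega)]
      by_cases hacc : acc = "" <;> simp [bLoop, hL, hacc]

theorem mainLemma (sent lab : List String) (hpre : lab.length ≤ sent.length) (fuel : Nat) :
    ∀ (i : Nat) (rS rL : List String), lab.length - i ≤ fuel →
    aMain sent lab fuel i rS rL = bLoop ((sent.zip lab).drop i) rS rL "" none := by
  induction fuel with
  | zero =>
    intro i rS rL hf
    rw [zip_drop_nil sent lab i (by omega)]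
    simp [aMain, bLoop]
  | succ fuel ih =>
    intro i rS rL hf
    by_cases h : i < lab.length
    · by_cases hS : (pvSt lab[i] == "S") = true
      · rw [show aMain sent lab (fuel + 1) i rS rL
              = aMain sent lab fuel (i + 1) (rS ++ [sent.getD i ""]) (rL ++ [pvSfx lab[i]])
            from by rw [aMain]; simp [h, hS]]
        rw [ih (i + 1) _ _ (by omega), zip_drop_cons sent lab i hpre h]
        have hS' : pvSt lab[i] = "S" := by simpa using hS
        simp [bLoop, hS']
      · by_cases hO : (pvSfx lab[i] == "O") = true
        · rw [show aMain sent lab (fuel + 1) i rS rL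
                = aMain sent lab fuel (aOLoop sent lab lab.length i "").2
                    (rS ++ [(aOLoop sent lab lab.length i "").1]) (rL ++ ["O"]) from by
              rw [aMain]; simp [h, hS, hO]]
          have hgt := aOLoop_gt sent lab lab.length i "" (by omega) h hO
          rw [ih _ _ _ (by omega)]
          rw [← oLemma sent lab hpre lab.length i "" rS rL (by omega)]
          rw [zip_drop_cons sent lab i hpre h]
          have hS' : ¬ pvSt lab[i] = "S" := by simpa using hS
          have hO' : pvSfx lab[i] = "O" := by simpa using hO
          simp [bLoop, hS', hO']
        · have hS' : ¬ pvSt lab[i] = "S" := by simpa using hS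
          have hO' : ¬ pvSfx lab[i] = "O" := by simpa using hO
          have hgt := aEntLoop_gt sent lab (pvSfx lab[i]) lab.length i "" rS rL
            (by omega) h (by simp)
          have e := entLemma sent lab hpre (pvSfx lab[i]) (by simpa using hO)
            lab.length i "" rS rL (by omega)
          by_cases hne : ((aEntLoop sent lab (pvSfx lab[i]) lab.length i "" rS rL).2.2.1
              != "") = true
          · rw [show aMain sent lab (fuel + 1) i rS rL
                  = aMain sent lab fuel
                      (aEntLoop sent lab (pvSfx lab[i]) lab.length i "" rS rL).2.2.2
                      ((aEntLoop sent lab (pvSfx lab[i]) lab.length i "" rS rL).1 ++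
                        [(aEntLoop sent lab (pvSfx lab[i]) lab.length i "" rS rL).2.2.1])
                      ((aEntLoop sent lab (pvSfx lab[i]) lab.length i "" rS rL).2.1 ++
                        [pvSfx lab[i]]) from by
                rw [aMain]; simp [h, hS, hO, hne]]
            rw [if_pos hne, if_pos hne] at e
            rw [ih _ _ _ (by omega), ← e, zip_drop_cons sent lab i hpre h]
            by_cases hE : pvSt lab[i] = "E" <;> simp [bLoop, hS', hO', hE]
          · rw [show aMain sent lab (fuel + 1) i rS rL
                  = aMain sent lab fuel
                      (aEntLoop sent lab (pvSfx lab[i]) lab.length i "" rS rL).2.2.2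
                      (aEntLoop sent lab (pvSfx lab[i]) lab.length i "" rS rL).1
                      (aEntLoop sent lab (pvSfx lab[i]) lab.length i "" rS rL).2.1 from by
                rw [aMain]; simp [h, hS, hO, hne]]
            rw [if_neg hne, if_neg hne] at e
            rw [ih _ _ _ (by omega), ← e, zip_drop_cons sent lab i hpre h]
            by_cases hE : pvSt lab[i] = "E" <;> simp [bLoop, hS', hO', hE]
    · rw [show aMain sent lab (fuel + 1) i rS rL = (rS, rL) from by rw [aMain]; simp [h]]
      rw [zip_drop_nil sent lab i (by omega)]
      simp [bLoop]

-- ===== VERDICT (by name: the statement is the Claim_ definition above) =====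
theorem merge_label_sentence_bmeso_py_spec : Claim_equal_merge_label_sentence_bmeso_py := by
  intro sentence label _ hpre
  unfold Spec_merge_label_sentence_bmeso_py merge_label_sentence_bmeso_py
    merge_label_sentence_bmeso_py_alt
  simpa using mainLemma sentence label hpre label.length 0 [] [] (by omega)
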